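-- pv_equiv track=rewrite | github.com/iliyan-pigeon/Codewars_exercises | Not_So_Random.py | not_so_random
-- ===== SOURCE A (Python) =====
-- def not_so_random(b, w):
--     black_marbles = b
--     white_marbles = w
--
--     while True:
--         if black_marbles > 0 and white_marbles > 0:
--             white_marbles -= 1
--         elif black_marbles > 1 and white_marbles == 0:
--             black_marbles -= 2
--             white_marbles += 1
--         elif black_marbles == 0 and white_marbles > 1:
--             white_marbles -= 1
--         elif black_marbles == 1 and white_marbles == 0:
--             return "Black"
--         elif black_marbles == 0 and white_marbles == 1:
--             return "White"
--         else:
--             return "Unsure"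
-- ===== SOURCE B (Python) =====
-- def not_so_random(b, w):
--     if b >= 0 and w >= 0 and (b != 0 or w != 0):
--         return "Black" if b % 2 else "White"
--     return "Unsure"
-- ===== Notes on version B (the rewrite author's own statement) =====
-- stated objective: faster
-- what changed: Replaces the marble-removal simulation loop by the closed form: the parity of b is invariant, so the answer is Black iff b is odd, White otherwise, and Unsure only when no valid start state exists (b=w=0 or a negative count).
import Mathlib
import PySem

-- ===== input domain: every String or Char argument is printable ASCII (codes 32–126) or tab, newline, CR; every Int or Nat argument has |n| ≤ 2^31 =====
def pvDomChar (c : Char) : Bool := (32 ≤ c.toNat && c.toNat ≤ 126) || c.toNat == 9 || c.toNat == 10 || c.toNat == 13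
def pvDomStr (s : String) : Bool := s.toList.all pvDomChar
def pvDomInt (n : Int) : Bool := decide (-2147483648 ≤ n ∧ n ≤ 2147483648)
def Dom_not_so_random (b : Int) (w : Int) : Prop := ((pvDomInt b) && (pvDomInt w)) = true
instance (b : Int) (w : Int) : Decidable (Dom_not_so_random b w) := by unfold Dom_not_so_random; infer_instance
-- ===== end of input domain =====

-- B replaces A's step-by-step marble simulation by an O(1) parity formula (b's parity is invariant under the moves).

-- ===== PORT A =====
-- A's `while True` loop over the mutable state (black_marbles, white_marbles), branch for branch.
def not_so_random_loop (black : Int) (white : Int) : String :=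
  if black > 0 ∧ white > 0 then
    not_so_random_loop black (white - 1)
  else if black > 1 ∧ white = 0 then
    not_so_random_loop (black - 2) (white + 1)
  else if black = 0 ∧ white > 1 then
    not_so_random_loop black (white - 1)
  else if black = 1 ∧ white = 0 then
    "Black"
  else if black = 0 ∧ white = 1 then
    "White"
  else
    "Unsure"
termination_by (2 * black + white).toNat
decreasing_by all_goals omega

def not_so_random (b : Int) (w : Int) : String := not_so_random_loop b w

-- ===== PORT B =====
def not_so_random_alt (b : Int) (w : Int) : String :=
  if b ≥ 0 ∧ w ≥ 0 ∧ (b ≠ 0 ∨ w ≠ 0) then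
    if b % 2 ≠ 0 then "Black" else "White"
  else
    "Unsure"

-- ===== PRECONDITION & SPEC =====
def Spec_not_so_random (b : Int) (w : Int) (out : String) : Prop := out = not_so_random_alt b w
instance (b : Int) (w : Int) (out : String) : Decidable (Spec_not_so_random b w out) := by unfold Spec_not_so_random; infer_instance

-- ===== CLAIM (what is proved, stated in full; the proofs are below) =====
def Claim_equal_not_so_random : Prop := ∀ (b : Int) (w : Int), Dom_not_so_random b w → Spec_not_so_random b w (not_so_random b w)

-- ===== LEMMAS AND PROOFS =====

-- Loop invariant: the loop's result is the parity formula of the current state.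
theorem loop_eq_alt (b w : Int) : not_so_random_loop b w = not_so_random_alt b w := by
  induction b, w using not_so_random_loop.induct with
  | case1 b w h ih =>
    rw [not_so_random_loop, if_pos h, ih]
    unfold not_so_random_alt
    split_ifs <;> first | rfl | omega
  | case2 b w h1 h ih =>
    rw [not_so_random_loop, if_neg h1, if_pos h, ih]
    unfold not_so_random_alt
    split_ifs <;> first | rfl | omega
  | case3 b w h1 h2 h ih =>
    rw [not_so_random_loop, if_neg h1, if_neg h2, if_pos h, ih]
    unfold not_so_random_alt
    split_ifs <;> first | rfl | omega
  | case4 b w h1 h2 h3 h =>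
    rw [not_so_random_loop, if_neg h1, if_neg h2, if_neg h3, if_pos h]
    unfold not_so_random_alt
    split_ifs <;> first | rfl | omega
  | case5 b w h1 h2 h3 h4 h =>
    rw [not_so_random_loop, if_neg h1, if_neg h2, if_neg h3, if_neg h4, if_pos h]
    unfold not_so_random_alt
    split_ifs <;> first | rfl | omega
  | case6 b w h1 h2 h3 h4 h5 =>
    rw [not_so_random_loop, if_neg h1, if_neg h2, if_neg h3, if_neg h4, if_neg h5]
    unfold not_so_random_alt
    split_ifs <;> first | rfl | omega

-- ===== VERDICT (by name: the statement is the Claim_ definition above) =====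
theorem not_so_random_spec : Claim_equal_not_so_random := by
  intro b w _
  unfold Spec_not_so_random not_so_random
  exact loop_eq_alt b w
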